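-- pv_equiv track=rewrite | github.com/Pranish-Pantha/Kattis | 2048.py | getColAfter
-- ===== SOURCE A (Python) =====
-- def getColAfter(Board, col, ind):
--     temp = []
--     for line in Board:
--         temp.append(line[col])
--     if 0 in temp:
--         if list(reversed(temp)).index(0) == 0:
--             return 0
--     return temp[ind:].count(0)
-- ===== SOURCE B (Python) =====
-- def getColAfter(Board, col, ind):
--     n = len(Board)
--     start = ind + n if ind < 0 else ind
--     if start < 0:
--         start = 0
--     count = 0
--     last = None
--     for i, row in enumerate(Board):
--         v = row[col]
--         last = v
--         if v == 0 and i >= start: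
--             count += 1
--     if last == 0:
--         return 0
--     return count
-- ===== Notes on version B (the rewrite author's own statement) =====
-- stated objective: alternative
-- what changed: Replaces A's build-column-list-then-three-scans (membership test, reversed().index, slice+count) with a single accumulating pass that tracks the last column value and counts zeros at positions covered by the slice, with the slice start computed up front from len(Board).
import Mathlib
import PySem

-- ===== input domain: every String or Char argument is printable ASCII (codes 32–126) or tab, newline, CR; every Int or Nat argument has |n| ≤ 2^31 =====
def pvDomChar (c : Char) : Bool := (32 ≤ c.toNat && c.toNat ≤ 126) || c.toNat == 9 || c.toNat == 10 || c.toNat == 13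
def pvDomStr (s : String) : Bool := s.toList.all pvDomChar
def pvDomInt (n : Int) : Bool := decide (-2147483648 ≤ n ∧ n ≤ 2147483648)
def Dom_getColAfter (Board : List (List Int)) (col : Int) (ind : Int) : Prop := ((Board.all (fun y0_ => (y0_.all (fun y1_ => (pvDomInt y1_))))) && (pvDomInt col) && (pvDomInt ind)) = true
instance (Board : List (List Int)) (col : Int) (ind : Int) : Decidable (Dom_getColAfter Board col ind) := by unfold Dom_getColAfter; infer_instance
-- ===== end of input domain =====

-- B replaces A's build-column-then-three-scans with a single accumulating pass (same cost); return-value equivalence on Pre_.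

-- ===== PORT A =====
def getColAfter (Board : List (List Int)) (col : Int) (ind : Int) : Int :=
  let temp := Board.foldl (fun acc line => acc ++ [PySem.List.pyGetD line col 0]) []
  if (0 : Int) ∈ temp then
    if PySem.List.index? temp.reverse (0 : Int) = some 0 then 0
    else ((PySem.List.slice temp (some ind) none).count 0 : Int)
  else ((PySem.List.slice temp (some ind) none).count 0 : Int)

-- ===== PORT B =====
def getColAfter_alt (Board : List (List Int)) (col : Int) (ind : Int) : Int :=
  let n : Int := Board.length
  let start0 : Int := if ind < 0 then ind + n else ind
  let start : Int := if start0 < 0 then 0 else start0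
  let r : Int × Option Int :=
    (PySem.List.enumerate Board 0).foldl
      (fun (p : Int × Option Int) iv =>
        let v := PySem.List.pyGetD iv.2 col 0
        (if v = 0 ∧ iv.1 ≥ start then p.1 + 1 else p.1, some v))
      (0, none)
  if r.2 = some 0 then 0 else r.1

-- ===== PRECONDITION & SPEC =====
-- Pre_: every row must admit Python index `col` (otherwise A raises IndexError).
def Pre_getColAfter (Board : List (List Int)) (col : Int) (_ind : Int) : Prop :=
  ∀ line ∈ Board, PySem.Raise.InRange line.length col
instance (Board : List (List Int)) (col : Int) (ind : Int) : Decidable (Pre_getColAfter Board col ind) := by unfold Pre_getColAfter; infer_instance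
def pvWitness_getColAfter : List (List Int) × Int × Int := ([[1, 0], [0, 2]], 0, 1)

def Spec_getColAfter (Board : List (List Int)) (col : Int) (ind : Int) (out : Int) : Prop := out = getColAfter_alt Board col ind
instance (Board : List (List Int)) (col : Int) (ind : Int) (out : Int) : Decidable (Spec_getColAfter Board col ind out) := by unfold Spec_getColAfter; infer_instance

-- ===== CLAIM (what is proved, stated in full; the proofs are below) =====
def Claim_equal_getColAfter : Prop := ∀ (Board : List (List Int)) (col : Int) (ind : Int), Dom_getColAfter Board col ind → Pre_getColAfter Board col ind → Spec_getColAfter Board col ind (getColAfter Board col ind)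

-- ===== LEMMAS AND PROOFS =====

-- counts zeros of t at positions s, s+1, … that are ≥ start
def pvCnt (start : Int) : List Int → Int → Int
  | [], _ => 0
  | x :: xs, s => (if x = 0 ∧ s ≥ start then 1 else 0) + pvCnt start xs (s + 1)

def pvLastO : List Int → Option Int → Option Int
  | [], l => l
  | x :: xs, _ => pvLastO xs (some x)

theorem pvFold_char (start : Int) (col : Int) (Board : List (List Int)) :
    ∀ (s c : Int) (l : Option Int),
    (PySem.List.enumerate Board s).foldl
      (fun (p : Int × Option Int) iv =>
        let v := PySem.List.pyGetD iv.2 col 0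
        (if v = 0 ∧ iv.1 ≥ start then p.1 + 1 else p.1, some v))
      (c, l)
    = (c + pvCnt start (Board.map (fun line => PySem.List.pyGetD line col 0)) s,
       pvLastO (Board.map (fun line => PySem.List.pyGetD line col 0)) l) := by
  induction Board with
  | nil => intro s c l; simp [PySem.List.enumerate_nil, pvCnt, pvLastO]
  | cons r rs ih =>
    intro s c l
    rw [PySem.List.enumerate_cons]
    simp only [List.foldl_cons, List.map_cons, pvCnt, pvLastO]
    rw [ih]
    refine Prod.ext ?_ rfl
    simp only
    split_ifs <;> ring

theorem pvLastO_eq (t : List Int) : ∀ l, pvLastO t l = t.reverse.head?.or l := by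
  induction t with
  | nil => intro l; simp [pvLastO]
  | cons x xs ih =>
    intro l
    simp only [pvLastO, List.reverse_cons, ih, List.head?_append]
    cases xs.reverse.head? <;> rfl

theorem pvCnt_eq (start : Int) (t : List Int) :
    ∀ s : Int, 0 ≤ s → pvCnt start t s = ((t.drop (start - s).toNat).count 0 : Int) := by
  induction t with
  | nil => intro s _; simp [pvCnt]
  | cons x xs ih =>
    intro s hs0
    simp only [pvCnt]
    rw [ih (s + 1) (by omega)]
    by_cases h : start ≤ s
    · have h0 : (start - s).toNat = 0 := by omega
      have h1 : (start - (s + 1)).toNat = 0 := by omega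
      rw [h0, h1]
      simp only [List.drop_zero, List.count_cons]
      by_cases hx : x = 0 <;> simp [hx, h] <;> try omega
    · have h0 : (start - s).toNat = (start - (s + 1)).toNat + 1 := by omega
      rw [h0, List.drop_succ_cons]
      have : ¬ (s ≥ start) := by omega
      simp [this]

theorem pvIndex_rev_head (t : List Int) :
    (PySem.List.index? t.reverse (0 : Int) = some 0) ↔ t.reverse.head? = some 0 := by
  cases h : t.reverse with
  | nil => simp
  | cons x xs =>
    by_cases hx : x = (0 : Int)
    · subst hx; rw [PySem.List.index?_cons_self]; simp
    · rw [PySem.List.index?_cons_of_ne xs hx]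
      simp [hx]

theorem pvDrop_count_clamp (t : List Int) (ind : Int) :
    ((PySem.List.slice t (some ind) none).count 0 : Int)
    = ((t.drop (if (if ind < 0 then ind + (t.length : Int) else ind) < 0 then 0
          else (if ind < 0 then ind + (t.length : Int) else ind)).toNat).count 0 : Int) := by
  rw [PySem.List.slice_some_none]
  unfold PySem.List.clampIdx
  by_cases h : ind < 0
  · simp only [h, if_true]
    by_cases h2 : (t.length : Int) + ind < 0
    · have h3 : ind + (t.length : Int) < 0 := by omega
      simp [h2, h3]
    · have h3 : ¬ (ind + (t.length : Int) < 0) := by omega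
      have h4 : ((t.length : Int) + ind).toNat = (ind + (t.length : Int)).toNat := by omega
      simp [h2, h3, h4]
  · simp only [h, if_false]
    by_cases h2 : ind.toNat ≤ t.length
    · have : min ind.toNat t.length = ind.toNat := by omega
      simp [this]
    · have e1 : t.drop (min ind.toNat t.length) = [] := by
        rw [List.drop_eq_nil_iff]; omega
      have e2 : t.drop ind.toNat = [] := by
        rw [List.drop_eq_nil_iff]; omega
      have h3 : ¬ (ind < 0) := h
      simp [e1, e2]

theorem getColAfter_spec : Claim_equal_getColAfter := by
  intro Board col ind _ _
  unfold Spec_getColAfter getColAfter getColAfter_alt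
  simp only
  rw [PySem.List.foldl_append_singleton_eq_map, List.nil_append]
  rw [pvFold_char]
  set f : List Int → Int := fun line => PySem.List.pyGetD line col 0 with hf
  set t : List Int := Board.map f with ht
  have hlen : Board.length = t.length := by simp [ht]
  set start0 : Int := if ind < 0 then ind + (Board.length : Int) else ind with hs0
  set start : Int := if start0 < 0 then 0 else start0 with hs
  have hstart : 0 ≤ start := by rw [hs]; split <;> omega
  simp only
  rw [pvLastO_eq, Option.or_none]
  rw [pvCnt_eq start t 0 (le_refl 0)]
  have hcnt : ((PySem.List.slice t (some ind) none).count 0 : Int)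
      = 0 + ((t.drop (start - 0).toNat).count 0 : Int) := by
    rw [pvDrop_count_clamp t ind]
    rw [hs, hs0, hlen]
    norm_num
  by_cases hh : t.reverse.head? = some 0
  · have hmem : (0 : Int) ∈ t := by
      have := List.mem_of_mem_head? hh
      exact (List.mem_reverse).mp this
    rw [if_pos hmem, if_pos ((pvIndex_rev_head t).mpr hh), if_pos hh]
  · rw [if_neg hh]
    by_cases hmem : (0 : Int) ∈ t
    · rw [if_pos hmem, if_neg (fun c => hh ((pvIndex_rev_head t).mp c))]
      exact hcnt
    · rw [if_neg hmem]
      exact hcnt
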